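-- pv_equiv track=rewrite | github.com/IssamMaarouf/Side-Projects-Python | Advent of Code 2024/Advent_Calender2024_9.py | find_dot_chains_in_list
-- ===== SOURCE A (Python) =====
-- def find_dot_chains_in_list(lst, l, file_group):
--     chains = -1
--     n = len(lst)
--     i = 0
--
--     while i < n:
--         if lst[i] == ".":
--             start = i
--             while i < n and lst[i] == ".":
--                 i += 1
--             # Add the chain once it ends
--             if (i - start) < file_group:
--                 continue
--             else:
--                 chains = start + l
--                 break
--         else:
--             i += 1
--
--     return chains
-- ===== SOURCE B (Python) =====
-- def find_dot_chains_in_list(lst, l, file_group):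
--     # Build the "barrier" positions (non-dot entries), bracketed by sentinels,
--     # then look at the dot-gap between consecutive barriers.  A run must be
--     # non-empty, so the threshold is at least 1.
--     n = len(lst)
--     barriers = [-1] + [i for i, x in enumerate(lst) if x != "."] + [n]
--     need = max(file_group, 1)
--     for p, q in zip(barriers, barriers[1:]):
--         if q - p - 1 >= need:
--             return p + 1 + l
--     return -1
-- ===== Notes on version B (the rewrite author's own statement) =====
-- stated objective: alternative
-- what changed: Instead of A's nested while loops that consume each dot run in place, B first builds the list of non-dot (barrier) positions bracketed by sentinels -1 and n, then scans consecutive barrier pairs for the first dot-gap of size >= max(file_group, 1) and returns gap start + l.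
import Mathlib
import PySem

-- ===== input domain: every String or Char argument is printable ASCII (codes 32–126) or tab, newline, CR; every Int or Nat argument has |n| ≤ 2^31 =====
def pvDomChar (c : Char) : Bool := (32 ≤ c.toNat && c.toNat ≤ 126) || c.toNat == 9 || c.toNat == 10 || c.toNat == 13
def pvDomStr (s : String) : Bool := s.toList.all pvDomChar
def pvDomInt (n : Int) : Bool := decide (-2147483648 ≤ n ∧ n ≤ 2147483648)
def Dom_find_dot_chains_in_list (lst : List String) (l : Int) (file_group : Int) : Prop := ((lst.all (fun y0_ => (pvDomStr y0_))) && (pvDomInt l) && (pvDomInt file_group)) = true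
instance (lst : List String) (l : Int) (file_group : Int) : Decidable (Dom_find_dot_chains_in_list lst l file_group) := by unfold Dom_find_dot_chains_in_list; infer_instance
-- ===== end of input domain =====

-- B replaces A's nested run-consuming while loops by a staged computation: first the
-- list of non-dot (barrier) positions bracketed by sentinels, then a scan of
-- consecutive barrier pairs for the first large enough dot-gap (objective: alternative).

set_option maxRecDepth 8000

-- ===== PORT A =====
-- inner while loop of A: consume consecutive "." entries from index i, returning (new i, remaining suffix)
def pvConsume : List String → Nat → Nat × List String
  | [], i => (i, [])
  | x :: r, i => if x == "." then pvConsume r (i+1) else (i, x :: r)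

-- length bound used only for the port's termination measure
theorem pvConsume_len : ∀ (r : List String) (i : Nat), (pvConsume r i).2.length ≤ r.length
  | [], _ => Nat.le_refl _
  | x :: r, i => by
    simp only [pvConsume]; split
    · exact Nat.le_trans (pvConsume_len r (i+1)) (Nat.le_succ _)
    · exact Nat.le_refl _

-- outer while loop of A, as recursion on the remaining suffix with the index i carried along
def pvALoop (l fg : Int) : List String → Nat → Int
  | [], _ => -1
  | x :: rest, i =>
    if x == "." then
      let p := pvConsume rest (i+1)
      if ((p.1 : Int) - (i : Int)) < fg then pvALoop l fg p.2 p.1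
      else (i : Int) + l
    else pvALoop l fg rest (i+1)
termination_by lst => lst.length
decreasing_by
  · exact Nat.lt_succ_of_le (pvConsume_len rest (i+1))
  · simp

def find_dot_chains_in_list (lst : List String) (l : Int) (file_group : Int) : Int :=
  pvALoop l file_group lst 0

-- ===== PORT B =====
-- the 'for p, q in zip(barriers, barriers[1:])' loop of B
def pvGapLoop (need l : Int) : List (Int × Int) → Int
  | [] => -1
  | (p, q) :: rest => if q - p - 1 ≥ need then p + 1 + l else pvGapLoop need l rest

def find_dot_chains_in_list_alt (lst : List String) (l : Int) (file_group : Int) : Int :=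
  let n : Int := lst.length
  let barriers : List Int :=
    (-1) :: ((PySem.List.enumerate lst 0).filterMap
      (fun p => if p.2 ≠ "." then some p.1 else none)) ++ [n]
  let need := max file_group 1
  pvGapLoop need l (barriers.zip barriers.tail)

-- ===== PRECONDITION & SPEC =====
def Spec_find_dot_chains_in_list (lst : List String) (l : Int) (file_group : Int) (out : Int) : Prop := out = find_dot_chains_in_list_alt lst l file_group
instance (lst : List String) (l : Int) (file_group : Int) (out : Int) : Decidable (Spec_find_dot_chains_in_list lst l file_group out) := by unfold Spec_find_dot_chains_in_list; infer_instance

-- ===== CLAIM (what is proved, stated in full; the proofs are below) =====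
def Claim_equal_find_dot_chains_in_list : Prop := ∀ (lst : List String) (l : Int) (file_group : Int), Dom_find_dot_chains_in_list lst l file_group → Spec_find_dot_chains_in_list lst l file_group (find_dot_chains_in_list lst l file_group)

-- ===== LEMMAS AND PROOFS =====
-- number of leading dots / suffix after them, characterising pvConsume
def pvLeadDots : List String → Nat
  | [] => 0
  | x :: r => if x == "." then pvLeadDots r + 1 else 0

def pvDropDots : List String → List String
  | [] => []
  | x :: r => if x == "." then pvDropDots r else x :: r

theorem pvConsume_eq : ∀ (r : List String) (i : Nat),
    pvConsume r i = (i + pvLeadDots r, pvDropDots r)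
  | [], i => by simp [pvConsume, pvLeadDots, pvDropDots]
  | x :: r, i => by
    simp only [pvConsume, pvLeadDots, pvDropDots]
    split
    · rw [pvConsume_eq r (i+1)]; simp; omega
    · simp

theorem pvLeadDrop_len : ∀ (r : List String),
    r.length = pvLeadDots r + (pvDropDots r).length
  | [] => rfl
  | x :: r => by
    have := pvLeadDrop_len r
    simp only [pvLeadDots, pvDropDots]
    split
    · simp only [List.length_cons]; omega
    · simp

theorem pvDropDots_head : ∀ (r : List String) (b : String) (r' : List String),
    pvDropDots r = b :: r' → (b == ".") = false
  | [], _, _ => by simp [pvDropDots]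
  | x :: r, b, r' => by
    simp only [pvDropDots]
    split
    · exact pvDropDots_head r b r'
    · rename_i h; intro he
      cases he
      simpa using h

-- absolute positions of non-dot entries, the proof-side view of B's comprehension
def pvBars : List String → Nat → List Int
  | [], _ => []
  | x :: r, i => if x == "." then pvBars r (i+1) else (i : Int) :: pvBars r (i+1)

theorem pvBars_enumerate : ∀ (lst : List String) (i : Nat),
    (PySem.List.enumerate lst ((i : Nat) : Int)).filterMap
      (fun p => if p.2 ≠ "." then some p.1 else none) = pvBars lst i
  | [], _ => by simp [PySem.List.enumerate_nil, pvBars]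
  | x :: r, i => by
    rw [PySem.List.enumerate_cons, List.filterMap_cons,
        show ((i : Int) + 1) = ((i + 1 : Nat) : Int) by push_cast; ring,
        pvBars_enumerate r (i+1), pvBars]
    by_cases h : x = "."
    · subst h; simp
    · have hb : (x == ".") = false := by simpa using h
      simp [h, hb]

theorem pvBars_dropDots : ∀ (r : List String) (i : Nat),
    pvBars r i = pvBars (pvDropDots r) (i + pvLeadDots r)
  | [], i => by simp [pvBars, pvDropDots, pvLeadDots]
  | x :: r, i => by
    simp only [pvBars, pvDropDots, pvLeadDots]
    split
    · rw [pvBars_dropDots r (i+1)]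
      congr 1; omega
    · rename_i h
      simp [pvBars, h]

-- gap scan on the barrier list itself (zip with the tail, seen structurally)
def pvScan (need l : Int) : List Int → Int
  | [] => -1
  | [_] => -1
  | p :: q :: rest => if q - p - 1 ≥ need then p + 1 + l else pvScan need l (q :: rest)

theorem pvGapLoop_zip (need l : Int) : ∀ (bs : List Int),
    pvGapLoop need l (bs.zip bs.tail) = pvScan need l bs
  | [] => rfl
  | [_] => rfl
  | p :: q :: rest => by
    simp only [List.zip_cons_cons, List.tail_cons, pvGapLoop, pvScan]
    split
    · rfl
    · exact pvGapLoop_zip need l (q :: rest)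

-- arithmetic facts about the threshold max fg 1 used by the gap scan
theorem pvGeMax {fg c : Int} (hc : 1 ≤ c) (h : fg ≤ c) : c ≥ max fg 1 := max_le h hc

theorem pvNotGeMaxFg {fg c : Int} (h : c < fg) : ¬ c ≥ max fg 1 :=
  fun hge => absurd (le_trans (le_max_left fg 1) hge) (not_le.mpr h)

theorem pvNotGeMaxOne {fg c : Int} (h : c < 1) : ¬ c ≥ max fg 1 :=
  fun hge => absurd (le_trans (le_max_right fg 1) hge) (not_le.mpr h)

-- the key invariant: A's outer loop, resumed right after a barrier at position i-1,
-- equals the gap scan on (i-1) :: remaining barriers ++ [final sentinel]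
theorem pvKey (l fg : Int) : ∀ (n : Nat) (rest : List String), rest.length ≤ n → ∀ (i : Nat),
    pvALoop l fg rest i =
      pvScan (max fg 1) l (((i : Int) - 1) :: pvBars rest i ++ [(i : Int) + rest.length]) := by
  intro n
  induction n with
  | zero =>
    intro rest hle i
    have hr : rest = [] := List.length_eq_zero_iff.mp (Nat.le_zero.mp hle)
    subst hr
    rw [pvALoop, pvBars]
    simp only [List.length_nil, Nat.cast_zero, add_zero, List.cons_append, List.nil_append, pvScan]
    rw [if_neg (pvNotGeMaxOne (by omega))]
  | succ n ih =>
    intro rest hle i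
    cases rest with
    | nil =>
      rw [pvALoop, pvBars]
      simp only [List.length_nil, Nat.cast_zero, add_zero, List.cons_append, List.nil_append, pvScan]
      rw [if_neg (pvNotGeMaxOne (by omega))]
    | cons x r =>
      by_cases hx : x == "."
      · rw [pvALoop]
        simp only [hx, if_true, pvConsume_eq]
        have hlr := pvLeadDrop_len r
        have hbars : pvBars (x :: r) i = pvBars (pvDropDots r) (i + 1 + pvLeadDots r) := by
          rw [pvBars]
          simp only [hx, if_true]
          rw [pvBars_dropDots r (i+1)]
        rw [hbars]
        by_cases hfg : ((i + 1 + pvLeadDots r : Nat) : Int) - (i : Int) < fg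
        · rw [if_pos hfg]
          cases hd : pvDropDots r with
          | nil =>
            have hr : r.length = pvLeadDots r := by rw [hlr, hd]; simp
            rw [pvALoop, pvBars]
            simp only [List.cons_append, List.nil_append, pvScan]
            rw [if_neg (pvNotGeMaxFg (by
              simp only [List.length_cons, hr]
              push_cast at hfg ⊢
              omega))]
          | cons b r' =>
            have hb : (b == ".") = false := pvDropDots_head r b r' hd
            have hrlen : r.length = pvLeadDots r + (r'.length + 1) := by rw [hlr, hd]; simp
            rw [pvALoop]
            simp only [hb, Bool.false_eq_true, if_false]
            rw [ih r' (by simp only [List.length_cons] at hle; omega) (i + 1 + pvLeadDots r + 1),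
                pvBars]
            simp only [hb, Bool.false_eq_true, if_false, List.cons_append, pvScan]
            rw [if_neg (pvNotGeMaxFg (by push_cast at hfg ⊢; omega))]
            rw [show ((i + 1 + pvLeadDots r + 1 : Nat) : Int) - 1
                  = ((i + 1 + pvLeadDots r : Nat) : Int) by push_cast; ring,
                show ((i + 1 + pvLeadDots r + 1 : Nat) : Int) + (r'.length : Int)
                  = (i : Int) + ((x :: r).length : Int) by
                    simp only [List.length_cons, hrlen]; push_cast; ring]
        · rw [if_neg hfg]
          cases hd : pvDropDots r with
          | nil =>
            have hr : r.length = pvLeadDots r := by rw [hlr, hd]; simp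
            rw [pvBars]
            simp only [List.cons_append, List.nil_append, pvScan]
            rw [if_pos (pvGeMax (by simp only [List.length_cons, hr]; push_cast; omega)
              (by simp only [List.length_cons, hr]; push_cast at hfg ⊢; omega))]
            omega
          | cons b r' =>
            have hb : (b == ".") = false := pvDropDots_head r b r' hd
            rw [pvBars]
            simp only [hb, Bool.false_eq_true, if_false, List.cons_append, pvScan]
            rw [if_pos (pvGeMax (by push_cast; omega) (by push_cast at hfg ⊢; omega))]
            omega
      · rw [pvALoop]
        simp only [hx, Bool.false_eq_true, if_false]
        rw [ih r (by simpa using hle) (i+1), pvBars]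
        simp only [hx, Bool.false_eq_true, if_false, List.cons_append, pvScan]
        rw [if_neg (pvNotGeMaxOne (by omega))]
        rw [show ((i + 1 : Nat) : Int) - 1 = (i : Int) by push_cast; ring,
            show ((i + 1 : Nat) : Int) + (r.length : Int)
              = (i : Int) + ((x :: r).length : Int) by
                simp only [List.length_cons]; push_cast; ring]

-- ===== VERDICT (by name: the statement is the Claim_ definition above) =====
theorem find_dot_chains_in_list_spec : Claim_equal_find_dot_chains_in_list := by
  intro lst l fg _
  unfold Spec_find_dot_chains_in_list find_dot_chains_in_list find_dot_chains_in_list_alt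
  rw [show ((0 : Int)) = ((0 : Nat) : Int) from rfl, pvBars_enumerate lst 0, pvGapLoop_zip,
      pvKey l fg lst.length lst (Nat.le_refl _) 0]
  norm_num
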